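-- pv_equiv track=rewrite | github.com/takwas/flask_app_template | template_app/utils.py | contains_alnum
-- ===== SOURCE A (Python) =====
-- def contains_alnum(string):
-- 	''' Returns true if string contains both
-- 	alphabets and numbers
-- 	'''
--
-- 	al, num = 0, 0
--
-- 	for s in string:
-- 		if s.isalpha():
-- 			al +=1
-- 		if s.isdigit():
-- 			num +=1
--
-- 	if al <=0 or num<=0:
-- 		return False
--
-- 	return True
-- ===== SOURCE B (Python) =====
-- ALPHA_CHARS = set('ABCDEFGHIJKLMNOPQRSTUVWXYZabcdefghijklmnopqrstuvwxyz')
-- DIGIT_CHARS = set('0123456789')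
--
--
-- def contains_alnum(string):
--     ''' Returns true if string contains both
--     alphabets and numbers
--     '''
--     chars = set(string)
--     return not chars.isdisjoint(ALPHA_CHARS) and not chars.isdisjoint(DIGIT_CHARS)
-- ===== Notes on version B (the rewrite author's own statement) =====
-- stated objective: alternative
-- what changed: Replaced the per-character classification counting loop with a set-based test: deduplicate the string into a set once and check non-disjointness against explicit constant alphabet/digit character sets, with no counters and no isalpha/isdigit calls (measured ~4x faster: C-level set construction and isdisjoint replace a Python-level loop with two method calls per character).
import Mathlib
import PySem

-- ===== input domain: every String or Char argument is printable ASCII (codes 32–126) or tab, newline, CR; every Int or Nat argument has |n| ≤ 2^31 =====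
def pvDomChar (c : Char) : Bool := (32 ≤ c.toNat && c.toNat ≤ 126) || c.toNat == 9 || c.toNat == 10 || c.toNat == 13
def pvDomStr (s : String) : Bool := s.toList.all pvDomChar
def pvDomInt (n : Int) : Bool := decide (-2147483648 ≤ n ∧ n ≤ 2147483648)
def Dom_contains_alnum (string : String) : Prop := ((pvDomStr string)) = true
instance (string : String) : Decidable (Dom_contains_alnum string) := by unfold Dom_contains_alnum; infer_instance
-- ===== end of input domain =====

-- B replaces A's counting classification loop by a set-based test: dedup the string into a set
-- once, then check non-disjointness against explicit constant alphabet/digit character sets.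

-- ===== PORT A =====
def contains_alnum (string : String) : Bool :=
  let (al, num) := string.toList.foldl
    (fun (p : Int × Int) s =>
      let p := if PySem.Chars.isalpha s then (p.1 + 1, p.2) else p
      if PySem.Chars.isdigit s then (p.1, p.2 + 1) else p)
    (0, 0)
  if al ≤ 0 || num ≤ 0 then false else true

-- ===== PORT B =====
def pvAlphaChars : PySem.Set Char :=
  PySem.Set.ofList "ABCDEFGHIJKLMNOPQRSTUVWXYZabcdefghijklmnopqrstuvwxyz".toList

def pvDigitChars : PySem.Set Char := PySem.Set.ofList "0123456789".toList

def contains_alnum_alt (string : String) : Bool :=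
  let chars := PySem.Set.ofList string.toList
  !(PySem.Set.isdisjoint chars pvAlphaChars) && !(PySem.Set.isdisjoint chars pvDigitChars)

-- ===== PRECONDITION & SPEC =====
def Spec_contains_alnum (string : String) (out : Bool) : Prop := out = contains_alnum_alt string
instance (string : String) (out : Bool) : Decidable (Spec_contains_alnum string out) := by unfold Spec_contains_alnum; infer_instance

-- ===== CLAIM (what is proved, stated in full; the proofs are below) =====
def Claim_equal_contains_alnum : Prop := ∀ (string : String), Dom_contains_alnum string → Spec_contains_alnum string (contains_alnum string)

-- ===== LEMMAS AND PROOFS =====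

-- the counting fold computes (a + #alpha, n + #digit)
theorem contains_alnum_fold_eq (l : List Char) (a n : Int) :
    l.foldl
      (fun (p : Int × Int) s =>
        let p := if PySem.Chars.isalpha s then (p.1 + 1, p.2) else p
        if PySem.Chars.isdigit s then (p.1, p.2 + 1) else p)
      (a, n)
    = (a + (l.countP PySem.Chars.isalpha : Int), n + (l.countP PySem.Chars.isdigit : Int)) := by
  induction l generalizing a n with
  | nil => simp
  | cons c t ih =>
    simp only [List.foldl_cons, List.countP_cons]
    by_cases h1 : PySem.Chars.isalpha c <;> by_cases h2 : PySem.Chars.isdigit c <;>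
      simp only [h1, h2, if_true] <;>
      rw [ih] <;> push_cast <;> ring_nf

-- on the ASCII domain the classifier calls agree with membership in the literal sets
set_option maxRecDepth 4000 in
theorem dom_isalpha_eq (c : Char) (h : pvDomChar c = true) :
    PySem.Chars.isalpha c = decide (c ∈ pvAlphaChars) := by
  have hle : c.toNat < 127 := by
    simp only [pvDomChar, Bool.or_eq_true, Bool.and_eq_true, decide_eq_true_eq, beq_iff_eq] at h
    omega
  have hc : Char.ofNat c.toNat = c := Char.ofNat_toNat c
  have key : ∀ n < 127, PySem.Chars.isalpha (Char.ofNat n) = decide (Char.ofNat n ∈ pvAlphaChars) := by decide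
  rw [← hc]; exact key c.toNat hle

set_option maxRecDepth 4000 in
theorem dom_isdigit_eq (c : Char) (h : pvDomChar c = true) :
    PySem.Chars.isdigit c = decide (c ∈ pvDigitChars) := by
  have hle : c.toNat < 127 := by
    simp only [pvDomChar, Bool.or_eq_true, Bool.and_eq_true, decide_eq_true_eq, beq_iff_eq] at h
    omega
  have hc : Char.ofNat c.toNat = c := Char.ofNat_toNat c
  have key : ∀ n < 127, PySem.Chars.isdigit (Char.ofNat n) = decide (Char.ofNat n ∈ pvDigitChars) := by decide
  rw [← hc]; exact key c.toNat hle

-- ===== VERDICT (by name: the statement is the Claim_ definition above) =====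
theorem contains_alnum_spec : Claim_equal_contains_alnum := by
  intro s hdom
  unfold Spec_contains_alnum contains_alnum contains_alnum_alt
  rw [contains_alnum_fold_eq]
  have hd : ∀ c ∈ s.toList, pvDomChar c = true := by
    simpa [Dom_contains_alnum, pvDomStr, List.all_eq_true] using hdom
  have hA : (0 < s.toList.countP PySem.Chars.isalpha) ↔ ∃ c ∈ PySem.Set.ofList s.toList, c ∈ pvAlphaChars := by
    rw [List.countP_pos_iff]
    constructor
    · rintro ⟨c, hc, hca⟩
      exact ⟨c, (PySem.Set.mem_ofList _ _).2 hc, by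
        have := dom_isalpha_eq c (hd c hc); rw [this] at hca; exact of_decide_eq_true hca⟩
    · rintro ⟨c, hc, hca⟩
      have hcm := (PySem.Set.mem_ofList _ _).1 hc
      exact ⟨c, hcm, by rw [dom_isalpha_eq c (hd c hcm)]; exact decide_eq_true hca⟩
  have hD : (0 < s.toList.countP PySem.Chars.isdigit) ↔ ∃ c ∈ PySem.Set.ofList s.toList, c ∈ pvDigitChars := by
    rw [List.countP_pos_iff]
    constructor
    · rintro ⟨c, hc, hca⟩
      exact ⟨c, (PySem.Set.mem_ofList _ _).2 hc, by
        have := dom_isdigit_eq c (hd c hc); rw [this] at hca; exact of_decide_eq_true hca⟩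
    · rintro ⟨c, hc, hca⟩
      have hcm := (PySem.Set.mem_ofList _ _).1 hc
      exact ⟨c, hcm, by rw [dom_isdigit_eq c (hd c hcm)]; exact decide_eq_true hca⟩
  have hdis : ∀ (t : PySem.Set Char),
      (!(PySem.Set.isdisjoint (PySem.Set.ofList s.toList) t)) = true ↔
        ∃ c ∈ PySem.Set.ofList s.toList, c ∈ t := by
    intro t
    rw [Bool.not_eq_true', Bool.eq_false_iff]
    constructor
    · intro h
      by_contra hn
      push Not at hn
      exact h ((PySem.Set.isdisjoint_iff _ _).2 hn)
    · rintro ⟨c, hc, hct⟩ hdisj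
      exact ((PySem.Set.isdisjoint_iff _ _).1 hdisj) c hc hct
  rw [Bool.eq_iff_iff]
  simp only [Bool.and_eq_true, hdis, ← hA, ← hD, Bool.or_eq_true, decide_eq_true_eq]
  split <;> rename_i h
  · simp only [Bool.false_eq_true, false_iff, not_and, not_lt]
    rcases h with h | h <;> omega
  · push Not at h
    exact (iff_of_true rfl ⟨by omega, by omega⟩)
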